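-- pv_equiv track=rewrite | github.com/Shirohi-git/AtCoder | todo/abc154_edp.py | k3
-- ===== SOURCE A (Python) =====
-- def k1(n):
--     str1_n = str(n)
--     keta1 = len(str1_n)
--     cnt = 9 * (keta1 - 1) + int(str1_n[0])
--     return cnt
--
-- def k2(n):
--     str2_n = str(n)
--     keta2 = len(str2_n)
--     cnt = 81 * (keta2 - 1) * (keta2 - 2) // 2
--     cnt += (int(str2_n[0]) - 1) * k1(10 ** (keta2 - 1) - 1)
--     cnt += k1(n - (int(str2_n[0]) * 10 ** (keta2 - 1)))
--     return cnt
--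
-- def k3(n):
--     str3_n = str(n)
--     keta3 = len(str3_n)
--     t = 0
--     for i in range(keta3-2):
--         t += (i+1)*i//2
--     cnt = 729 * t
--     cnt += (int(str3_n[0]) - 1) * k2(10 ** (keta3 - 1) - 1)
--     cnt += k2(n - (int(str3_n[0]) * 10 ** (keta3 - 1)))
--     return cnt
-- ===== SOURCE B (Python) =====
-- # B: single left-to-right digit DP over str(n): for each position, count completions
-- # with exactly 3 nonzero digits via small binomials, instead of A's k1/k2/k3 layering.
--
-- def _ncr(r, t):
--     # r choose t for t in {0,1,2,3}
--     if t == 0: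
--         return 1
--     if t == 1:
--         return r
--     if t == 2:
--         return r * (r - 1) // 2
--     return r * (r - 1) * (r - 2) // 6
--
-- def k3(n):
--     ds = [int(c) for c in str(n)]
--     total = 0
--     k = 0
--     L = len(ds)
--     for i in range(L):
--         d = ds[i]
--         rem = L - i - 1
--         for x in range(d):
--             need = 3 - k - (1 if x != 0 else 0)
--             if 0 <= need <= rem:
--                 total += _ncr(rem, need) * 9 ** need
--         if d != 0:
--             k += 1
--     if k == 3:
--         total += 1
--     return total
-- ===== Notes on version B (the rewrite author's own statement) =====
-- stated objective: alternative
-- what changed: A counts integers in [1,n] having exactly three nonzero digits via three layered closed-form helpers k1/k2/k3 that re-stringify shrinking numbers; B is a single left-to-right digit DP over str(n) that at each position adds binomial counts of the completions still needing the remaining nonzero digits, plus n itself if tight.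
import Mathlib
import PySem

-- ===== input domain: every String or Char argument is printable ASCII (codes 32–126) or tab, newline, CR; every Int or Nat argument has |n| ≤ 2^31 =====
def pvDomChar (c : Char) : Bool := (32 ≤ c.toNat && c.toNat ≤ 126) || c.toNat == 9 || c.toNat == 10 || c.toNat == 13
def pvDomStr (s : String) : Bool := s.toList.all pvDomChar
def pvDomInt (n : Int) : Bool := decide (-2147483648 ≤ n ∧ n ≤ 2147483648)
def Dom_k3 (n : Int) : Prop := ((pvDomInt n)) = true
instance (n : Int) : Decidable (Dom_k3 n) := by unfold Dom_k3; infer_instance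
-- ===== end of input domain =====

-- B replaces A's three-layer k1/k2/k3 closed-form recursion by one left-to-right digit DP
-- over str(n) (objective: alternative, similar cost).

-- ===== PORT A =====
-- int(str(n)[0]): index then int(); both none-branches are unreachable for n >= 0 (Pre_k3)
def headInt (s : String) : Int :=
  match PySem.Str.pyGet? s 0 with
  | some c => (PySem.Int.ofChars? [c]).getD 0
  | none => 0

def k1 (n : Int) : Int :=
  let str1n := PySem.Int.toStr n
  let keta1 := PySem.Str.len str1n
  9 * (keta1 - 1) + headInt str1n

-- `10 ** (keta - 1)`: keta >= 1 always (str(n) is nonempty), so `.toNat` on the exponent is exact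
def k2 (n : Int) : Int :=
  let str2n := PySem.Int.toStr n
  let keta2 := PySem.Str.len str2n
  PySem.Int.floordiv (81 * (keta2 - 1) * (keta2 - 2)) 2
    + (headInt str2n - 1) * k1 ((10 : Int) ^ (keta2 - 1).toNat - 1)
    + k1 (n - headInt str2n * (10 : Int) ^ (keta2 - 1).toNat)

def k3 (n : Int) : Int :=
  let str3n := PySem.Int.toStr n
  let keta3 := PySem.Str.len str3n
  let t := (PySem.List.pyRange 0 (keta3 - 2)).foldl
    (fun t i => t + PySem.Int.floordiv ((i + 1) * i) 2) 0
  729 * t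
    + (headInt str3n - 1) * k2 ((10 : Int) ^ (keta3 - 1).toNat - 1)
    + k2 (n - headInt str3n * (10 : Int) ^ (keta3 - 1).toNat)

-- ===== PORT B =====
def nCr (r t : Int) : Int :=
  if t == 0 then 1
  else if t == 1 then r
  else if t == 2 then PySem.Int.floordiv (r * (r - 1)) 2
  else PySem.Int.floordiv (r * (r - 1) * (r - 2)) 6

-- the body of Source B's inner `for x in range(d)` loop; `9 ** need` is guarded by 0 <= need,
-- so `.toNat` on the exponent is exact
def bBody (k rem : Int) (tot x : Int) : Int :=
  let need := 3 - k - (if x ≠ 0 then 1 else 0)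
  if 0 ≤ need ∧ need ≤ rem then tot + nCr rem need * 9 ^ need.toNat else tot

-- Source B's position loop as structural recursion over the digit list; the carried state k is
-- Source B's k, `t.length` is Source B's rem = L - i - 1; the final `if k == 3: total += 1` is the [] case
def bLoop (k : Int) : List Int → Int
  | [] => if k == 3 then 1 else 0
  | d :: t =>
      (PySem.List.pyRange 0 d).foldl (bBody k (t.length : Int)) 0
        + bLoop (if d ≠ 0 then k + 1 else k) t

-- ds = [int(c) for c in str(n)]; the getD-0 branch is unreachable for n >= 0 (Pre_k3)
def k3_alt (n : Int) : Int :=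
  bLoop 0 ((PySem.Int.toChars n).map (fun c => (PySem.Int.ofChars? [c]).getD 0))

-- ===== PRECONDITION & SPEC =====
-- Pre_k3 excludes exactly the negative inputs, on which both Pythons raise ValueError (int of the minus sign while parsing str(n)).
def Pre_k3 (n : Int) : Prop := 0 ≤ n
instance (n : Int) : Decidable (Pre_k3 n) := by unfold Pre_k3; infer_instance
def pvWitness_k3 : Int := 3047
def Spec_k3 (n : Int) (out : Int) : Prop := out = k3_alt n
instance (n : Int) (out : Int) : Decidable (Spec_k3 n out) := by unfold Spec_k3; infer_instance

-- ===== CLAIM (what is proved, stated in full; the proofs are below) =====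
def Claim_equal_k3 : Prop := ∀ (n : Int), Dom_k3 n → Pre_k3 n → Spec_k3 n (k3 n)

-- ===== LEMMAS AND PROOFS =====
lemma toDigitsCore_eq (f : Nat) : ∀ (m : Nat) (acc : List Char), 0 < m → m ≤ f →
    Nat.toDigitsCore 10 f m acc = ((Nat.digits 10 m).map Nat.digitChar).reverse ++ acc := by
  induction f with
  | zero => intro m acc h1 h2; omega
  | succ f ih =>
    intro m acc h1 h2
    rw [Nat.toDigitsCore]
    by_cases h : m / 10 = 0
    · have hm10 : m < 10 := by omega
      simp [h, Nat.digits_def' (by norm_num : 1 < 10) h1, Nat.mod_eq_of_lt hm10]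
    · have h3 : 0 < m / 10 := Nat.pos_of_ne_zero h
      have h4 : m / 10 ≤ f := by
        have := Nat.div_lt_self h1 (by norm_num : 1 < 10); omega
      simp only [h, if_false]
      rw [ih (m / 10) _ h3 h4, Nat.digits_def' (by norm_num : 1 < 10) h1]
      simp

lemma parse_digitChar (d : Nat) (hd : d < 10) :
    (PySem.Int.ofChars? [Nat.digitChar d]).getD 0 = (d : Int) := by
  interval_cases d <;> decide

lemma toChars_nat (m : Nat) :
    PySem.Int.toChars (m : Int)
      = if m = 0 then ['0'] else ((Nat.digits 10 m).map Nat.digitChar).reverse := by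
  by_cases h : m = 0
  · subst h; decide
  · rw [PySem.Int.toChars]
    simp only [Int.natCast_nonneg, if_neg (by omega : ¬ ((m:Int) < 0)), Int.toNat_natCast]
    rw [Nat.toDigits, toDigitsCore_eq (m+1) m [] (by omega) (by omega)]
    simp [h]

def Len (m : Nat) : Nat := if m = 0 then 1 else (Nat.digits 10 m).length
def Hd (m : Nat) : Nat := (Nat.digits 10 m).getLastD 0

lemma len_toStr (m : Nat) : PySem.Str.len (PySem.Int.toStr (m : Int)) = (Len m : Int) := by
  rw [PySem.Str.len, PySem.Int.toStr]
  by_cases h : m = 0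
  · subst h; decide
  · simp [toChars_nat, h, Len]

lemma head_toStr (m : Nat) : headInt (PySem.Int.toStr (m : Int)) = (Hd m : Int) := by
  by_cases h : m = 0
  · subst h; decide
  · have hne : Nat.digits 10 m ≠ [] := (Nat.digits_ne_nil_iff_ne_zero (b:=10)).mpr h
    have hsplit := List.dropLast_append_getLast hne
    rw [headInt]
    rw [PySem.Str.pyGet?]
    have htl : (PySem.Int.toStr (m : Int)).toList = PySem.Int.toChars (m : Int) :=
      PySem.Int.toList_toStr _
    rw [htl, toChars_nat, if_neg h, ← hsplit]
    simp only [List.map_append, List.reverse_append, List.map_cons, List.map_nil,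
      List.reverse_cons, List.reverse_nil, List.nil_append, List.cons_append]
    rw [PySem.Chars.pyGet?, PySem.List.pyGet?_zero_cons]
    have hlast : (Nat.digits 10 m).getLast hne < 10 :=
      Nat.digits_lt_base (by norm_num) (List.getLast_mem hne)
    simp only []
    rw [parse_digitChar _ hlast]
    rw [Hd, List.getLastD_eq_getLast?, List.getLast?_eq_getLast hne]
    simp

lemma len_pos (m : Nat) : 1 ≤ Len m := by
  rw [Len]; split
  · omega
  · rename_i h
    have := (Nat.digits_ne_nil_iff_ne_zero (b:=10)).mpr h
    cases hd : Nat.digits 10 m with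
    | nil => exact absurd hd this
    | cons a t => simp [hd]

def Rem (m : Nat) : Nat := m - Hd m * 10 ^ (Len m - 1)

lemma digits_split (m : Nat) (hm : 0 < m) :
    Nat.digits 10 m = (Nat.digits 10 m).dropLast ++ [Hd m]
    ∧ 1 ≤ Hd m
    ∧ Len m = (Nat.digits 10 m).dropLast.length + 1
    ∧ Nat.ofDigits 10 (Nat.digits 10 m).dropLast = Rem m
    ∧ m = Hd m * 10 ^ (Len m - 1) + Rem m
    ∧ Rem m < 10 ^ (Len m - 1) := by
  have hne : Nat.digits 10 m ≠ [] := (Nat.digits_ne_nil_iff_ne_zero (b := 10)).mpr (by omega)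
  have hHd : Hd m = (Nat.digits 10 m).getLast hne := by
    rw [Hd, List.getLastD_eq_getLast?, List.getLast?_eq_getLast hne]; rfl
  have hsplit : (Nat.digits 10 m).dropLast ++ [Hd m] = Nat.digits 10 m := by
    rw [hHd]; exact List.dropLast_append_getLast hne
  have hHd1 : 1 ≤ Hd m := by
    have := Nat.getLast_digit_ne_zero 10 (show m ≠ 0 by omega)
    rw [hHd]; omega
  have hlen : Len m = (Nat.digits 10 m).dropLast.length + 1 := by
    rw [Len, if_neg (by omega), ← hsplit]; simp
  have hval : m = Nat.ofDigits 10 (Nat.digits 10 m).dropLast + Hd m * 10 ^ (Len m - 1) := by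
    conv_lhs => rw [← Nat.ofDigits_digits 10 m, ← hsplit]
    rw [Nat.ofDigits_append, Nat.ofDigits_singleton]
    have : (Nat.digits 10 m).dropLast.length = Len m - 1 := by omega
    rw [this, Nat.mul_comm]
  have hlt : Nat.ofDigits 10 (Nat.digits 10 m).dropLast < 10 ^ (Len m - 1) := by
    have : (Nat.digits 10 m).dropLast.length = Len m - 1 := by omega
    rw [← this]
    exact Nat.ofDigits_lt_base_pow_length (by norm_num)
      (fun x hx => Nat.digits_lt_base (by norm_num) (List.Sublist.subset (List.dropLast_sublist _) hx))
  have hrem : Nat.ofDigits 10 (Nat.digits 10 m).dropLast = Rem m := by rw [Rem]; omega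
  exact ⟨hsplit.symm, hHd1, hlen, hrem, by omega, by omega⟩

lemma pad_digits (lows : List Nat) (h : ∀ x ∈ lows, x < 10) :
    ∃ p, lows.reverse
      = List.replicate p 0 ++ (Nat.digits 10 (Nat.ofDigits 10 lows)).reverse := by
  induction lows using List.reverseRecOn with
  | nil => exact ⟨0, by simp⟩
  | append_singleton ys z ih =>
    by_cases hz : z = 0
    · subst hz
      obtain ⟨p, hp⟩ := ih (fun x hx => h x (List.mem_append_left _ hx))
      refine ⟨p + 1, ?_⟩
      rw [List.reverse_append]
      simp only [List.reverse_cons, List.reverse_nil, List.nil_append, List.singleton_append]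
      rw [Nat.ofDigits_append]
      simp only [Nat.ofDigits_singleton, Nat.ofDigits_nil]
      simpa [List.replicate_succ] using hp
    · refine ⟨0, ?_⟩
      rw [Nat.digits_ofDigits 10 (by norm_num) _ h
        (fun h' => by rwa [List.getLast_append_singleton])]
      simp

lemma nines_digits (j : Nat) : Nat.digits 10 (10 ^ j - 1) = List.replicate j 9 := by
  induction j with
  | zero => simp
  | succ j ih =>
    have h1 : (1:Nat) ≤ 10 ^ j := Nat.one_le_pow _ _ (by norm_num)
    have h2 : (10:Nat) ^ (j + 1) = 10 * 10 ^ j := by ring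
    have hpos : 0 < 10 ^ (j + 1) - 1 := by omega
    rw [Nat.digits_def' (by norm_num : (1:Nat) < 10) hpos]
    have hmod : (10 ^ (j + 1) - 1) % 10 = 9 := by omega
    have hdiv : (10 ^ (j + 1) - 1) / 10 = 10 ^ j - 1 := by omega
    rw [hmod, hdiv, ih, List.replicate_succ]



def bigD (m : Nat) : List Int :=
  if m = 0 then [0] else (Nat.digits 10 m).reverse.map (fun d => (d : Int))

def TERM (k : Int) (rem : Nat) : Int :=
  if 0 ≤ 3 - k ∧ 3 - k ≤ (rem : Int) then nCr (rem : Int) (3 - k) * 9 ^ ((3 : Int) - k).toNat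
  else 0

lemma flatMap_replicate_zero (p : Nat) :
    List.flatMap (fun a : Nat => [(a : Int)]) (List.replicate p 0) = List.replicate p 0 := by
  induction p with
  | zero => simp
  | succ p ih => simp [List.replicate_succ, ih]

lemma bigD_decomp (m : Nat) (hm : 0 < m) :
    ∃ p, bigD m = (Hd m : Int) ::
      (List.replicate p (0 : Int) ++ (Nat.digits 10 (Rem m)).reverse.map (fun d => (d : Int)))
    ∧ p + (Nat.digits 10 (Rem m)).length = Len m - 1 := by
  obtain ⟨hsplit, hHd1, hlen, hrem, hval, hlt⟩ := digits_split m hm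
  obtain ⟨p, hp⟩ := pad_digits (Nat.digits 10 m).dropLast
    (fun x hx => Nat.digits_lt_base (by norm_num) (List.Sublist.subset (List.dropLast_sublist _) hx))
  rw [hrem] at hp
  refine ⟨p, ?_, ?_⟩
  · rw [bigD, if_neg (by omega)]
    conv_lhs => rw [hsplit]
    rw [List.reverse_append, List.reverse_singleton, List.singleton_append, hp]
    simp [flatMap_replicate_zero]
  · have hLL := congrArg List.length hp
    rw [List.length_reverse, List.length_append, List.length_replicate,
      List.length_reverse] at hLL
    omega

lemma bLoop_zero_cons (k : Int) (t : List Int) : bLoop k ((0 : Int) :: t) = bLoop k t := by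
  simp [bLoop]

lemma bLoop_pad (p : Nat) (k : Int) (l : List Int) :
    bLoop k (List.replicate p (0 : Int) ++ l) = bLoop k l := by
  induction p with
  | zero => simp
  | succ p ih => simpa [List.replicate_succ, bLoop_zero_cons] using ih

lemma bigD_eq_digits (m : Nat) (k : Int) :
    bLoop k (bigD m) = bLoop k ((Nat.digits 10 m).reverse.map (fun d => (d : Int))) := by
  by_cases h : m = 0
  · subst h; simp [bigD, bLoop_zero_cons]
  · simp [bigD, h]

lemma sum_if_zero (c0 c1 : Int) (d : Int) (hd : 0 ≤ d) :
    ((PySem.List.pyRange 0 d).map (fun x => if x = 0 then c0 else c1)).sum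
      = if d = 0 then 0 else c0 + (d - 1) * c1 := by
  induction d, hd using Int.le_induction with
  | base => norm_num [show PySem.List.pyRange 0 0 = [] from rfl]
  | succ d hd ih =>
    rw [PySem.List.pyRange_one_succ_right hd]
    rw [List.map_append, List.sum_append]
    rw [ih]
    by_cases h0 : d = 0
    · subst h0; norm_num
    · rw [if_neg h0, if_neg (by omega)]
      have : (if d = 0 then c0 else c1) = c1 := by rw [if_neg h0]
      simp [this]
      ring

lemma bLoop_cons (k d : Int) (t : List Int) (hd : 1 ≤ d) :
    bLoop k (d :: t) = TERM k t.length + (d - 1) * TERM (k + 1) t.length + bLoop (k + 1) t := by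
  rw [bLoop, if_pos (show d ≠ 0 by omega)]
  have hcong : ∀ (tot x : Int), x ∈ PySem.List.pyRange 0 d →
      bBody k (t.length : Int) tot x
        = tot + (if x = 0 then TERM k t.length else TERM (k + 1) t.length) := by
    intro tot x _
    by_cases hx0 : x = 0
    · subst hx0
      simp only [bBody, ne_eq, not_true_eq_false, if_false, sub_zero, TERM, if_pos rfl]
      split_ifs <;> ring
    · rw [if_neg hx0]
      simp only [bBody, ne_eq, hx0, not_false_eq_true, if_true, TERM]
      have h31 : (3 : Int) - k - 1 = 3 - (k + 1) := by ring
      rw [h31]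
      split_ifs <;> ring
  rw [PySem.List.foldl_congr_mem _ _ _ _ hcong, PySem.List.foldl_add,
    sum_if_zero _ _ d (by omega), if_neg (by omega)]
  ring

lemma bLoop_ge4 : ∀ (l : List Int) (k : Int), 4 ≤ k → bLoop k l = 0 := by
  intro l
  induction l with
  | nil => intro k hk; simp [bLoop]; omega
  | cons d t ih =>
    intro k hk
    rw [bLoop]
    have hcong : ∀ (tot : Int), ∀ x ∈ PySem.List.pyRange 0 d,
        bBody k (t.length : Int) tot x = (fun (acc _ : Int) => acc) tot x := by
      intro tot x _
      simp only [bBody]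
      rw [if_neg]
      push_neg
      intro h
      exfalso
      split_ifs at h <;> omega
    rw [PySem.List.foldl_congr_mem _ _ _ _ hcong, PySem.List.foldl_ignore]
    have : bLoop (if d ≠ 0 then k + 1 else k) t = 0 := by
      split_ifs <;> [exact ih _ (by omega); exact ih _ (by omega)]
    omega

lemma term3 (rem : Nat) : TERM 3 rem = 1 := by
  simp [TERM, nCr]

lemma term4 (rem : Nat) : TERM 4 rem = 0 := by
  norm_num [TERM]

lemma bLoop_three (l : List Int) (h : ∀ x ∈ l, 0 ≤ x) : bLoop 3 l = 1 := by
  induction l with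
  | nil => simp [bLoop]
  | cons d t ih =>
    have hd0 : 0 ≤ d := h d (by simp)
    by_cases hd : d = 0
    · subst hd; rw [bLoop_zero_cons]; exact ih (fun x hx => h x (by simp [hx]))
    · rw [bLoop_cons 3 d t (by omega), term3,
        show (3:Int) + 1 = 4 by norm_num, term4, bLoop_ge4 t 4 (by omega)]
      ring

lemma nat_ch3 (j : Nat) : j.choose 3 = j * (j - 1) * (j - 2) / 6 := by
  rw [Nat.choose_eq_descFactorial_div_factorial]
  congr 1
  · show j.descFactorial 3 = _
    simp [Nat.descFactorial_succ, Nat.descFactorial_zero]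
    ring

lemma ch2 (j : Nat) :
    PySem.Int.floordiv ((j : Int) * ((j : Int) - 1)) 2 = (j.choose 2 : Int) := by
  match j with
  | 0 => decide
  | (j + 1) =>
    have hc : ((j : Int) + 1) * ((j : Int) + 1 - 1) = (((j + 1) * j : Nat) : Int) := by
      push_cast; ring
    rw [show ((j + 1 : Nat) : Int) = (j : Int) + 1 by push_cast; ring, hc,
      show (2:Int) = ((2:Nat):Int) by norm_num, PySem.Int.floordiv_natCast]
    norm_num [Nat.choose_two_right]

lemma ch3 (j : Nat) :
    PySem.Int.floordiv ((j : Int) * ((j : Int) - 1) * ((j : Int) - 2)) 6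
      = (j.choose 3 : Int) := by
  match j with
  | 0 => decide
  | 1 => decide
  | (j + 2) =>
    have hc : ((j : Int) + 2) * ((j : Int) + 2 - 1) * ((j : Int) + 2 - 2)
        = (((j + 2) * (j + 1) * j : Nat) : Int) := by push_cast; ring
    rw [show ((j + 2 : Nat) : Int) = (j : Int) + 2 by push_cast; ring, hc,
      show (6:Int) = ((6:Nat):Int) by norm_num, PySem.Int.floordiv_natCast, nat_ch3]
    norm_num

lemma term0 (rem : Nat) : TERM 0 rem = 729 * (rem.choose 3 : Int) := by
  rw [TERM]
  split_ifs with h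
  · rw [show (3:Int) - 0 = 3 by norm_num,
      show nCr (rem:Int) 3
        = PySem.Int.floordiv ((rem:Int) * ((rem:Int) - 1) * ((rem:Int) - 2)) 6 from rfl, ch3]
    simp
    ring
  · rw [Nat.choose_eq_zero_of_lt (by norm_num at h; omega : rem < 3)]; norm_num

lemma term1 (rem : Nat) : TERM 1 rem = 81 * (rem.choose 2 : Int) := by
  rw [TERM]
  split_ifs with h
  · rw [show (3:Int) - 1 = 2 by norm_num,
      show nCr (rem:Int) 2
        = PySem.Int.floordiv ((rem:Int) * ((rem:Int) - 1)) 2 from rfl, ch2]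
    simp
    ring
  · rw [Nat.choose_eq_zero_of_lt (by norm_num at h; omega : rem < 2)]; norm_num

lemma term2 (rem : Nat) : TERM 2 rem = 9 * (rem : Int) := by
  rw [TERM]
  split_ifs with h
  · rw [show (3:Int) - 2 = 1 by norm_num, show nCr (rem:Int) 1 = (rem:Int) from rfl]
    simp
    ring
  · norm_num at h; omega

def K1 (m : Nat) : Int := 9 * ((Len m : Int) - 1) + (Hd m : Int)
def K2 (m : Nat) : Int :=
  PySem.Int.floordiv (81 * ((Len m : Int) - 1) * ((Len m : Int) - 2)) 2
    + ((Hd m : Int) - 1) * K1 (10 ^ (Len m - 1) - 1) + K1 (Rem m)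
def K3 (m : Nat) : Int :=
  729 * ((Len m - 1).choose 3 : Int)
    + ((Hd m : Int) - 1) * K2 (10 ^ (Len m - 1) - 1) + K2 (Rem m)

lemma tri (K : Nat) :
    (PySem.List.pyRange 0 (K : Int)).foldl
        (fun t i => t + PySem.Int.floordiv ((i + 1) * i) 2) 0
      = ((K + 1).choose 3 : Int) := by
  induction K with
  | zero => decide
  | succ K ih =>
    rw [show ((K + 1 : Nat) : Int) = (K : Int) + 1 by push_cast; ring,
      PySem.List.pyRange_one_succ_right (by positivity), List.foldl_append]
    simp only [List.foldl_cons, List.foldl_nil]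
    rw [ih]
    have h2 : PySem.Int.floordiv (((K : Int) + 1) * K) 2 = ((K + 1).choose 2 : Int) := by
      have h := ch2 (K + 1)
      rw [show ((K + 1 : Nat) : Int) = (K : Int) + 1 by push_cast; ring] at h
      simpa using h
    rw [h2, show K + 1 + 1 = (K + 1) + 1 from rfl, Nat.choose_succ_succ' (K + 1) 2]
    push_cast; ring

lemma ch2_81 (A : Nat) :
    PySem.Int.floordiv (81 * (A : Int) * ((A : Int) - 1)) 2 = 81 * (A.choose 2 : Int) := by
  match A with
  | 0 => decide
  | (A + 1) =>
    obtain ⟨c, hc⟩ := Nat.even_mul_succ_self A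
    have h1 : 81 * ((A + 1 : Nat) : Int) * (((A + 1 : Nat) : Int) - 1)
        = ((81 * ((A + 1) * A) : Nat) : Int) := by push_cast; ring
    rw [h1, show (2 : Int) = ((2 : Nat) : Int) by norm_num, PySem.Int.floordiv_natCast]
    have hca : (A + 1) * A = c + c := by rw [Nat.mul_comm]; exact hc
    have h4 : 81 * ((A + 1) * A) / 2 = 81 * c := by rw [hca]; omega
    have h5 : (A + 1).choose 2 = c := by
      rw [Nat.choose_two_right, Nat.add_sub_cancel, hca]; omega
    rw [h4, h5]; push_cast; ring

lemma getLastD_replicate9 (j : Nat) : (List.replicate (j + 1) (9 : Nat)).getLastD 0 = 9 := by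
  rw [List.replicate_succ']
  simp

lemma len_nines (j : Nat) : Len (10 ^ (j + 1) - 1) = j + 1 := by
  have h1 : (1 : Nat) ≤ 10 ^ (j + 1) := Nat.one_le_pow _ _ (by norm_num)
  have h2 : (10 : Nat) ^ (j + 1) ≥ 10 := by
    calc (10:Nat) ^ (j+1) ≥ 10 ^ 1 := Nat.pow_le_pow_right (by norm_num) (by omega)
    _ = 10 := by norm_num
  rw [Len, if_neg (by omega), nines_digits (j + 1), List.length_replicate]

lemma hd_nines (j : Nat) : Hd (10 ^ (j + 1) - 1) = 9 := by
  rw [Hd, nines_digits (j + 1), getLastD_replicate9]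

lemma rem_nines (j : Nat) : Rem (10 ^ (j + 1) - 1) = 10 ^ j - 1 := by
  have h1 : (1 : Nat) ≤ 10 ^ j := Nat.one_le_pow _ _ (by norm_num)
  have h2 : (10 : Nat) ^ (j + 1) = 10 * 10 ^ j := by ring
  rw [Rem, hd_nines, len_nines]
  simp only [Nat.add_sub_cancel]
  omega

lemma n1 (j : Nat) : K1 (10 ^ j - 1) = 9 * (j : Int) := by
  match j with
  | 0 => simp [K1, Len, Hd]
  | (j + 1) =>
    rw [K1, len_nines, hd_nines]
    push_cast; ring

lemma K1_zero : K1 0 = 0 := by simp [K1, Len, Hd]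
lemma K2_zero : K2 0 = 0 := by
  rw [K2]
  have : Rem 0 = 0 := by simp [Rem]
  rw [this]
  simp [Len, Hd, K1_zero]

lemma n2 (j : Nat) : K2 (10 ^ j - 1) = 81 * (j.choose 2 : Int) := by
  match j with
  | 0 => simpa using K2_zero
  | (j + 1) =>
    rw [K2, len_nines, hd_nines, rem_nines]
    simp only [Nat.add_sub_cancel]
    rw [n1 j,
      show ((j + 1 : Nat) : Int) - 1 = (j : Int) by push_cast; ring,
      show ((j + 1 : Nat) : Int) - 2 = (j : Int) - 1 by push_cast; ring,
      ch2_81 j, Nat.choose_succ_succ' j 1, Nat.choose_one_right]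
    push_cast; ring

lemma main : ∀ (m : Nat),
    K1 m = bLoop 2 (bigD m) ∧ K2 m = bLoop 1 (bigD m) ∧ K3 m = bLoop 0 (bigD m) := by
  intro m
  induction m using Nat.strong_induction_on with
  | _ m ih =>
    by_cases hm : m = 0
    · subst hm
      have hb : ∀ k : Int, bLoop k (bigD 0) = bLoop k [] := by
        intro k; rw [show bigD 0 = [(0 : Int)] from rfl, bLoop_zero_cons]
      refine ⟨?_, ?_, ?_⟩
      · rw [hb, K1_zero]; decide
      · rw [hb, K2_zero]; decide
      · rw [hb]
        rw [K3]
        have h0 : Rem 0 = 0 := by simp [Rem]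
        rw [h0]
        simp [Len, Hd, K2_zero]
        decide
    · have hmp : 0 < m := by omega
      obtain ⟨hsplit, hHd1, hlend, hrem, hval, hlt⟩ := digits_split m hmp
      obtain ⟨p, hbig, hplen⟩ := bigD_decomp m hmp
      have hLpos : 1 ≤ Len m := len_pos m
      have hrlt : Rem m < m := by
        have hp1 : (1 : Nat) ≤ 10 ^ (Len m - 1) := Nat.one_le_pow _ _ (by norm_num)
        have := Nat.mul_le_mul_right (10 ^ (Len m - 1)) hHd1
        omega
      have hlen2 : (List.replicate p (0 : Int)
          ++ (Nat.digits 10 (Rem m)).reverse.map (fun d => (d : Int))).length = Len m - 1 := by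
        simp [hplen]
      have hstep : ∀ k : Int, bLoop k (bigD m)
          = TERM k (Len m - 1) + ((Hd m : Int) - 1) * TERM (k + 1) (Len m - 1)
            + bLoop (k + 1) (bigD (Rem m)) := by
        intro k
        rw [hbig, bLoop_cons k _ _ (by exact_mod_cast hHd1), hlen2, bLoop_pad,
          ← bigD_eq_digits]
      have hnonneg : ∀ x ∈ bigD (Rem m), 0 ≤ x := by
        intro x hx
        rw [bigD] at hx
        split_ifs at hx
        · simp at hx; omega
        · simp at hx; obtain ⟨d, _, hd⟩ := hx; omega
      obtain ⟨ih1, ih2, ih3⟩ := ih (Rem m) hrlt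
      refine ⟨?_, ?_, ?_⟩
      · rw [hstep 2, term2, show (2:Int) + 1 = 3 by norm_num, term3,
          bLoop_three _ hnonneg, K1]
        push_cast
        omega
      · rw [hstep 1, term1, show (1:Int) + 1 = 2 by norm_num, term2, ← ih1, K2, n1 (Len m - 1)]
        have hfd := ch2_81 (Len m - 1)
        have hc1 : ((Len m - 1 : Nat) : Int) = (Len m : Int) - 1 := by omega
        rw [hc1, show (Len m : Int) - 1 - 1 = (Len m : Int) - 2 by ring] at hfd
        rw [hfd]
      · rw [hstep 0, term0, show (0:Int) + 1 = 1 by norm_num, term1, ← ih2, K3,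
          n2 (Len m - 1)]



lemma porta1 (m : Nat) : k1 (m : Int) = K1 m := by
  simp only [k1, K1]
  rw [len_toStr, head_toStr]

lemma hrem_cast (m : Nat) :
    (m : Int) - (Hd m : Int) * (10 : Int) ^ (Len m - 1) = ((Rem m : Nat) : Int) := by
  by_cases hm : m = 0
  · subst hm; simp [Hd, Rem]
  · obtain ⟨_, _, _, _, hval, _⟩ := digits_split m (by omega)
    have hcast : (m : Int) = (Hd m : Int) * (10 : Int) ^ (Len m - 1) + ((Rem m : Nat) : Int) := by
      exact_mod_cast congrArg (fun x : Nat => (x : Int)) hval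
    omega

lemma hnines_cast (m : Nat) :
    (10 : Int) ^ (Len m - 1) - 1 = ((10 ^ (Len m - 1) - 1 : Nat) : Int) := by
  have h1 : (1 : Nat) ≤ 10 ^ (Len m - 1) := Nat.one_le_pow _ _ (by norm_num)
  push_cast [h1]
  ring

lemma porta2 (m : Nat) : k2 (m : Int) = K2 m := by
  simp only [k2, K2]
  rw [len_toStr, head_toStr,
    show (((Len m : Nat) : Int) - 1).toNat = Len m - 1 by
      have := len_pos m; omega,
    hnines_cast, hrem_cast, porta1, porta1]

lemma porta3 (m : Nat) : k3 (m : Int) = K3 m := by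
  simp only [k3, K3]
  rw [len_toStr, head_toStr,
    show (((Len m : Nat) : Int) - 1).toNat = Len m - 1 by
      have := len_pos m; omega,
    hnines_cast, hrem_cast, porta2, porta2]
  have htri : (PySem.List.pyRange 0 ((Len m : Int) - 2)).foldl
      (fun t i => t + PySem.Int.floordiv ((i + 1) * i) 2) 0
      = ((Len m - 1).choose 3 : Int) := by
    by_cases hL : Len m = 1
    · rw [hL]
      decide
    · have hL2 : 2 ≤ Len m := by have := len_pos m; omega
      rw [show (Len m : Int) - 2 = ((Len m - 2 : Nat) : Int) by omega, tri,
        show Len m - 2 + 1 = Len m - 1 by omega]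
  rw [htri]

lemma map_parse (l : List Nat) (h : ∀ d ∈ l, d < 10) :
    ((l.map Nat.digitChar).reverse).map (fun c => (PySem.Int.ofChars? [c]).getD 0)
      = l.reverse.map (fun d => (d : Int)) := by
  induction l with
  | nil => rfl
  | cons d t ih =>
    simp only [List.map_cons, List.reverse_cons, List.map_append, List.map_cons, List.map_nil]
    rw [ih (fun x hx => h x (List.mem_cons_of_mem _ hx)),
      parse_digitChar d (h d List.mem_cons_self)]
    simp

lemma portb (m : Nat) : k3_alt (m : Int) = bLoop 0 (bigD m) := by
  rw [k3_alt, toChars_nat]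
  by_cases hm : m = 0
  · subst hm
    rw [if_pos rfl]
    rfl
  · rw [if_neg hm, map_parse _ (fun d hd => Nat.digits_lt_base (by norm_num) hd),
      bigD, if_neg hm]

-- ===== VERDICT (by name: the statement is the Claim_ definition above) =====
theorem k3_spec : Claim_equal_k3 := by
  intro n _ hpre
  simp only [Pre_k3] at hpre
  have hm : n = ((n.toNat : Nat) : Int) := by omega
  unfold Spec_k3
  rw [hm, porta3, portb, (main n.toNat).2.2]
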